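-- pv_equiv track=rewrite | github.com/Rohit2998/Snake_ladder | snake_ladder.py | pos_mat
-- ===== SOURCE A (Python) =====
-- def pos_mat(grid_max_val,grid_size):
--     dic={}
--     j=1
--     k=0
--     grid=1
--     kl=grid_size
--     for i in range(0,grid_max_val):
--         fac=i//grid_size
--         j=i%grid_size
--         gb=(i+1)%grid_size
--
--         if gb==0:
--             gb=grid_size
--
--
--         if (fac+1)%2==0:
--             gb=kl
--             kl-=1
--             if kl==0:
--                 kl=grid_size
--
--
--         dic[i+1]=(gb,fac+1)
--
--     return dic
-- ===== SOURCE B (Python) =====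
-- def pos_mat(grid_max_val, grid_size):
--     dic = {}
--     rows = -(-grid_max_val // grid_size)  # ceil division; ZeroDivisionError when grid_size == 0
--     cell = 1
--     for row in range(1, rows + 1):
--         cols = range(1, grid_size + 1) if row % 2 == 1 else range(grid_size, 0, -1)
--         for col in cols:
--             if cell > grid_max_val:
--                 break
--             dic[cell] = (col, row)
--             cell += 1
--         if cell > grid_max_val:
--             break
--     return dic
-- ===== Notes on version B (the rewrite author's own statement) =====
-- stated objective: alternative
-- what changed: Replaces A's flat loop over cell indices with its stateful kl countdown by a nested row-then-column traversal: the row count is computed up front by ceiling division, each row iterates its columns forward or reversed by row parity, and a running cell counter breaks mid-row at grid_max_val.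
-- outside the precondition, e.g. on pos_mat(1, -1): A returns {1: (-1, 1)}, B returns {}; on pos_mat(5, -3): A returns {1: (-2, 1), 2: (-3, 0), 3: (-4, 0), 4: (-5, 0), 5: (-1, -1)}, B returns {}; on pos_mat(0, 0): A returns {}, B raises ZeroDivisionError
import Mathlib
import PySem

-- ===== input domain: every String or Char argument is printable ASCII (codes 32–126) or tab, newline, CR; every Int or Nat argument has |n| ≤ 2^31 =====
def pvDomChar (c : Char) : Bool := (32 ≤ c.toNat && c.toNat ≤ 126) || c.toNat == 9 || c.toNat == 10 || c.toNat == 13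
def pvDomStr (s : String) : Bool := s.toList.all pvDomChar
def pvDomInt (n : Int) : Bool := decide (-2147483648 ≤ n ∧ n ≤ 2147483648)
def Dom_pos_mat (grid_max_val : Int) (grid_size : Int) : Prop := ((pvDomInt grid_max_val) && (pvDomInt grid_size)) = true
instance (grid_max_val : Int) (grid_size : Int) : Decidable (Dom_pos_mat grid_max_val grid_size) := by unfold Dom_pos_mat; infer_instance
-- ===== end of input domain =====

-- B replaces A's flat stateful cell loop by a nested row-then-column traversal with a ceiling row
-- count and a mid-row break; return values only (no observable mutation in either).

-- ===== PORT A =====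
-- loop body of A (state = (dic, kl)); the unused Python assignment j=i%g is kept as `_j`
def posMatStep (grid_size : Int) (s : PySem.Dict Int (Int × Int) × Int) (i : Int) :
    PySem.Dict Int (Int × Int) × Int :=
  let dic := s.1
  let kl := s.2
  let fac := PySem.Int.floordiv i grid_size
  let _j := PySem.Int.mod i grid_size
  let gb0 := PySem.Int.mod (i + 1) grid_size
  let gb1 := if gb0 == 0 then grid_size else gb0
  if PySem.Int.mod (fac + 1) 2 == 0 then
    let gb2 := kl
    let kl1 := kl - 1
    let kl2 := if kl1 == 0 then grid_size else kl1
    (dic.insert (i + 1) (gb2, fac + 1), kl2)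
  else
    (dic.insert (i + 1) (gb1, fac + 1), kl)

-- the `for i in range(0, grid_max_val)` loop, one step per fuel unit; when grid_size = 0 the
-- body's `i//grid_size` raises ZeroDivisionError in Python (excluded by Pre_), so the loop stops
-- there (totality guard only, no alternative algorithm)
def posMatLoop (grid_size : Int) : Nat → Int → PySem.Dict Int (Int × Int) × Int → PySem.Dict Int (Int × Int) × Int
  | 0, _, s => s
  | fuel + 1, i, s =>
      if grid_size == 0 then s
      else posMatLoop grid_size fuel (i + 1) (posMatStep grid_size s i)

def pos_mat (grid_max_val : Int) (grid_size : Int) : List (Int × Int × Int) :=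
  ((posMatLoop grid_size grid_max_val.toNat 0 (PySem.Dict.empty, grid_size)).1).items

-- ===== PORT B =====
-- inner column loop of B with its `break` (state = (dic, cell)): `for col in cols` over the lazy
-- Python range, generated column by column from its start and step with one fuel unit per element
-- (both ranges have max(grid_size, 0) elements); returning the state early is exactly the break
def pvRowLoop (gmax : Int) (row : Int) (step : Int) :
    Nat → Int → PySem.Dict Int (Int × Int) × Int → PySem.Dict Int (Int × Int) × Int
  | 0, _, s => s
  | fuel + 1, col, s =>
      if s.2 > gmax then s
      else pvRowLoop gmax row step fuel (col + step) (s.1.insert s.2 (col, row), s.2 + 1)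

-- outer `for row in range(1, rows+1)` loop (one fuel unit per row, max(rows, 0) of them),
-- with B's post-row `if cell > grid_max_val: break`
def pvRowsLoop (gmax : Int) (g : Int) :
    Nat → Int → PySem.Dict Int (Int × Int) × Int → PySem.Dict Int (Int × Int) × Int
  | 0, _, s => s
  | fuel + 1, row, s =>
      let s' := if PySem.Int.mod row 2 == 1
        then pvRowLoop gmax row 1 g.toNat 1 s
        else pvRowLoop gmax row (-1) g.toNat g s
      if s'.2 > gmax then s'
      else pvRowsLoop gmax g fuel (row + 1) s'

def pos_mat_alt (grid_max_val : Int) (grid_size : Int) : List (Int × Int × Int) :=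
  let rows := -(PySem.Int.floordiv (-grid_max_val) grid_size)
  ((pvRowsLoop grid_max_val grid_size rows.toNat 1 (PySem.Dict.empty, 1)).1).items

-- ===== PRECONDITION & SPEC =====
-- Pre_ excludes grid_size = 0 (where A raises ZeroDivisionError when grid_max_val > 0, and where
-- B's up-front ceiling division raises it even for grid_max_val ≤ 0 while A returns {}), and
-- grid_size < 0 with grid_max_val > 0: a meaningless negative-width grid on which A's kl countdown
-- returns arbitrary negative coordinates no caller would specify (B returns {} there).
def Pre_pos_mat (grid_max_val : Int) (grid_size : Int) : Prop :=
  0 < grid_size ∨ (grid_max_val ≤ 0 ∧ grid_size ≠ 0)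
instance (grid_max_val : Int) (grid_size : Int) : Decidable (Pre_pos_mat grid_max_val grid_size) := by
  unfold Pre_pos_mat; infer_instance

def pvWitness_pos_mat : Int × Int := (10, 3)

def Spec_pos_mat (grid_max_val : Int) (grid_size : Int) (out : List (Int × Int × Int)) : Prop :=
  out = pos_mat_alt grid_max_val grid_size
instance (grid_max_val : Int) (grid_size : Int) (out : List (Int × Int × Int)) : Decidable (Spec_pos_mat grid_max_val grid_size out) := by
  unfold Spec_pos_mat; infer_instance

-- ===== CLAIM (what is proved, stated in full; the proofs are below) =====
def Claim_equal_pos_mat : Prop := ∀ (grid_max_val : Int) (grid_size : Int), Dom_pos_mat grid_max_val grid_size → Pre_pos_mat grid_max_val grid_size → Spec_pos_mat grid_max_val grid_size (pos_mat grid_max_val grid_size)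

-- ===== LEMMAS AND PROOFS =====

-- the entry for 0-based cell index i (valid for 0 < g), using Lean's `/` `%`
def pvEnt (g i : Int) : Int × Int × Int :=
  (i + 1, (if (i / g) % 2 = 0 then i % g + 1 else g - i % g, i / g + 1))

-- value of A's kl accumulator before processing index n
def pvKl (g n : Int) : Int := if (n / g) % 2 = 0 then g else g - n % g

def pvEntList (g : Int) (n : Nat) : List (Int × Int × Int) :=
  (List.range n).map (fun k => pvEnt g (Int.ofNat k))

lemma pvDivmod_succ (g q r : Int) (hg : 0 < g) (hr0 : 0 ≤ r) (hrg : r < g) :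
    (g * q + r) / g = q ∧ (g * q + r) % g = r := by
  constructor
  · rw [add_comm, Int.add_mul_ediv_left r q (by omega : g ≠ 0), Int.ediv_eq_zero_of_lt hr0 hrg]
    omega
  · rw [add_comm, Int.add_mul_emod_self_left, Int.emod_eq_of_lt hr0 hrg]

lemma pvFresh (g : Int) (n : Nat) (v : Int × Int) :
    (PySem.Dict.mk (pvEntList g n)).insert ((n : Int) + 1) v
      = PySem.Dict.mk (pvEntList g n ++ [((n : Int) + 1, v)]) := by
  apply PySem.Dict.ext
  rw [PySem.Dict.items_insert_of_not_contains (h := ?_)]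
  rw [PySem.Dict.contains_eq_decide_mem_keys]
  simp [PySem.Dict.keys, pvEntList, pvEnt]

lemma pvStep (g : Int) (hg : 0 < g) (n : Nat) :
    posMatStep g (PySem.Dict.mk (pvEntList g n), pvKl g (n : Int)) (n : Int)
      = (PySem.Dict.mk (pvEntList g (n + 1)), pvKl g ((n : Int) + 1)) := by
  have hgne : g ≠ 0 := by omega
  have hq := Int.mul_ediv_add_emod (n : Int) g
  have hr0 : 0 ≤ (n : Int) % g := Int.emod_nonneg _ hgne
  have hrg : (n : Int) % g < g := Int.emod_lt_of_pos _ hg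
  have h2r0 : 0 ≤ ((n:Int)+1) % g := Int.emod_nonneg _ hgne
  have h2rg : ((n:Int)+1) % g < g := Int.emod_lt_of_pos _ hg
  have hsucc : (((n : Int) + 1) / g = (n:Int)/g ∧ ((n:Int)+1) % g = (n:Int)%g + 1) ∨
               ((n:Int)%g = g - 1 ∧ ((n:Int)+1)/g = (n:Int)/g + 1 ∧ ((n:Int)+1)%g = 0) := by
    by_cases hb : (n:Int) % g = g - 1
    · right
      refine ⟨hb, ?_⟩
      have h := pvDivmod_succ g ((n:Int)/g + 1) 0 hg le_rfl hg
      have hmul : g * ((n:Int)/g + 1) = g * ((n:Int)/g) + g := by ring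
      have he : g * ((n:Int)/g + 1) + 0 = (n:Int) + 1 := by omega
      rw [he] at h
      exact h
    · left
      have h := pvDivmod_succ g ((n:Int)/g) ((n:Int)%g + 1) hg (by omega) (by omega)
      have he : g * ((n:Int)/g) + ((n:Int)%g + 1) = (n:Int) + 1 := by omega
      rw [he] at h
      exact h
  have hEL : pvEntList g (n+1) = pvEntList g n
      ++ [((n:Int)+1, (if ((n:Int)/g) % 2 = 0 then (n:Int)%g + 1 else g - (n:Int)%g, (n:Int)/g + 1))] := by
    unfold pvEntList pvEnt
    rw [List.range_succ, List.map_append]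
    simp [Int.ofNat_eq_natCast]
  simp only [posMatStep, pvKl,
    PySem.Int.floordiv_eq_ediv_of_pos hg, PySem.Int.mod_eq_emod_of_pos hg,
    PySem.Int.mod_eq_emod_of_pos (show (0:Int) < 2 by norm_num), beq_iff_eq]
  rw [hEL, pvFresh, pvFresh]
  by_cases hp : ((n:Int)/g) % 2 = 0
  · have hp1 : ¬ ((n:Int)/g + 1) % 2 = 0 := by omega
    simp only [if_pos hp, if_neg hp1]
    rcases hsucc with ⟨hd, hm⟩ | ⟨hb, hd, hm⟩
    · have hp2 : ((n:Int)+1)/g % 2 = 0 := by omega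
      have hgb : ¬ ((n:Int)+1) % g = 0 := by omega
      simp only [if_neg hgb, if_pos hp2, Prod.mk.injEq, PySem.Dict.mk.injEq,
        List.append_right_inj, List.cons.injEq, and_true, true_and]
      omega
    · have hp2 : ¬ ((n:Int)+1)/g % 2 = 0 := by omega
      simp only [if_pos hm, if_neg hp2, Prod.mk.injEq, PySem.Dict.mk.injEq,
        List.append_right_inj, List.cons.injEq, and_true, true_and]
      omega
  · have hp1 : ((n:Int)/g + 1) % 2 = 0 := by omega
    simp only [if_neg hp, if_pos hp1]
    rcases hsucc with ⟨hd, hm⟩ | ⟨hb, hd, hm⟩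
    · have hp2 : ¬ ((n:Int)+1)/g % 2 = 0 := by omega
      have hkl : ¬ g - (n:Int) % g - 1 = 0 := by omega
      simp only [if_neg hkl, if_neg hp2, Prod.mk.injEq, true_and]
      omega
    · have hp2 : ((n:Int)+1)/g % 2 = 0 := by omega
      have hkl : g - (n:Int) % g - 1 = 0 := by omega
      simp only [if_pos hkl, if_pos hp2]

lemma pvAfold (g : Int) (hg : 0 < g) (n : Nat) :
    (PySem.List.pyRange 0 (n : Int) 1).foldl (posMatStep g) (PySem.Dict.empty, g)
      = (PySem.Dict.mk (pvEntList g n), pvKl g (n : Int)) := by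
  induction n with
  | zero =>
      rw [Nat.cast_zero, PySem.List.pyRange_one_eq_nil le_rfl]
      simp [pvEntList, pvKl, PySem.Dict.empty]
  | succ n ih =>
      have h1 : ((n+1 : Nat) : Int) = (n : Int) + 1 := by push_cast; ring
      rw [h1, PySem.List.pyRange_one_succ_right (by positivity)]
      rw [List.foldl_append, ih]
      simp only [List.foldl_cons, List.foldl_nil]
      exact pvStep g hg n

lemma pvLoopRange (g : Int) (hg : g ≠ 0) (fuel : Nat) :
    ∀ (i : Int) (s : PySem.Dict Int (Int × Int) × Int),
      posMatLoop g fuel i s = (PySem.List.pyRange i (i + fuel) 1).foldl (posMatStep g) s := by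
  induction fuel with
  | zero =>
      intro i s
      rw [Nat.cast_zero, add_zero, PySem.List.pyRange_one_eq_nil le_rfl]
      rfl
  | succ fuel ih =>
      intro i s
      have hlt : i < i + ((fuel : Int) + 1) := by omega
      have hcast : i + ((fuel + 1 : Nat) : Int) = i + ((fuel : Int) + 1) := by push_cast; ring
      rw [posMatLoop, if_neg (by simpa using hg), ih]
      rw [hcast, PySem.List.pyRange_one_cons hlt, List.foldl_cons]
      have h2 : (i + 1) + (fuel : Int) = i + ((fuel : Int) + 1) := by ring
      rw [h2]

-- B's inner row loop, run from cell m+1 over fuel columns start, start+stp, ...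
lemma pvRowLoopGen (g : Int) (n : Nat) (row stp : Int) :
    ∀ (fuel : Nat) (start : Int) (m : Nat), m ≤ n →
    (∀ (p : Nat), p < fuel → (m:Int) + p < (n:Int) →
       pvEnt g ((m:Int) + p) = ((m:Int) + p + 1, (start + stp * p, row))) →
    pvRowLoop (n:Int) row stp fuel start (PySem.Dict.mk (pvEntList g m), (m:Int) + 1)
      = (PySem.Dict.mk (pvEntList g (min n (m + fuel))),
         ((min n (m + fuel) : Nat) : Int) + 1) := by
  intro fuel
  induction fuel with
  | zero =>
      intro start m hm _
      have h : min n (m + 0) = m := by omega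
      rw [h]
      simp [pvRowLoop]
  | succ fuel ih =>
      intro start m hm hc
      simp only [pvRowLoop]
      by_cases hbr : ((m:Int) + 1 > (n:Int))
      · have hmn : m = n := by omega
        have h : min n (m + (fuel + 1)) = m := by omega
        rw [h, if_pos hbr]
      · rw [if_neg hbr]
        have hmn : m < n := by omega
        have h0 := hc 0 (by omega) (by push_cast; omega)
        have hins : (PySem.Dict.mk (pvEntList g m)).insert ((m:Int) + 1) (start, row)
            = PySem.Dict.mk (pvEntList g (m + 1)) := by
          rw [pvFresh g m (start, row)]
          have : pvEntList g (m + 1) = pvEntList g m ++ [pvEnt g (m : Int)] := by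
            unfold pvEntList
            rw [List.range_succ, List.map_append]
            simp [Int.ofNat_eq_natCast]
          rw [this]
          have h0' : pvEnt g (m : Int) = ((m:Int) + 1, (start, row)) := by
            simpa using h0
          rw [h0']
        simp only [hins]
        have hrec := ih (start + stp) (m + 1) (by omega) (by
          intro p hp hlt
          have := hc (p + 1) (by omega) (by push_cast at hlt ⊢; omega)
          have hcast : ((m + 1 : Nat) : Int) + p = (m:Int) + (p + 1 : Nat) := by push_cast; ring
          have hcol : (start + stp) + stp * (p:Int) = start + stp * ((p + 1 : Nat) : Int) := by
            push_cast; ring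
          rw [hcast, hcol, this])
        have hlen : (m + 1) + fuel = m + (fuel + 1) := by omega
        rw [hlen] at hrec
        have hcell : (m:Int) + 1 + 1 = ((m + 1 : Nat) : Int) + 1 := by push_cast; ring
        rw [hcell]
        exact hrec

-- the outer row fold of B, for a positive grid width gn, after j rows
-- one row of B from the state after j full rows
lemma pvRowStep (gn : Nat) (hg : 0 < gn) (n : Nat) (j : Nat) :
    (if PySem.Int.mod ((j:Int) + 1) 2 == 1
     then pvRowLoop (n:Int) ((j:Int) + 1) 1 ((gn:Int)).toNat 1
            (PySem.Dict.mk (pvEntList (gn:Int) (min n (j * gn))), ((min n (j * gn) : Nat) : Int) + 1)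
     else pvRowLoop (n:Int) ((j:Int) + 1) (-1) ((gn:Int)).toNat (gn:Int)
            (PySem.Dict.mk (pvEntList (gn:Int) (min n (j * gn))), ((min n (j * gn) : Nat) : Int) + 1))
      = (PySem.Dict.mk (pvEntList (gn:Int) (min n ((j + 1) * gn))),
         ((min n ((j + 1) * gn) : Nat) : Int) + 1) := by
  set m := min n (j * gn) with hm
  have hmle : m ≤ n := by omega
  have hg' : (0:Int) < (gn:Int) := by exact_mod_cast hg
  -- row j+1 walks gn columns from some start with some step; their closed form below
  have hrow : ∀ (stp start : Int),
      (∀ (p : Nat), p < gn →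
         start + stp * (p:Int) = if ((j:Int)) % 2 = 0 then (p:Int) + 1 else (gn:Int) - (p:Int)) →
      pvRowLoop (n:Int) ((j:Int)+1) stp gn start (PySem.Dict.mk (pvEntList (gn:Int) m), (m:Int) + 1)
        = (PySem.Dict.mk (pvEntList (gn:Int) (min n ((j+1) * gn))),
           ((min n ((j+1) * gn) : Nat) : Int) + 1) := by
    intro stp start hval
    have hmin : min n (m + gn) = min n ((j+1) * gn) := by
      have hmul : (j+1) * gn = j * gn + gn := by ring
      omega
    rw [← hmin]
    apply pvRowLoopGen
    · exact hmle
    · intro p hp hlt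
      -- m + p < n forces m = j * gn
      have hmeq : m = j * gn := by
        rcases Nat.lt_or_ge (j * gn) n with h | h
        · omega
        · exfalso
          have : m = n := by omega
          omega
      have hplt : (p:Int) < (gn:Int) := by
        have : p < gn := by omega
        exact_mod_cast this
      have hidx : (m:Int) + p = (gn:Int) * (j:Int) + (p:Int) := by
        rw [hmeq]; push_cast; ring
      have hdm := pvDivmod_succ (gn:Int) (j:Int) (p:Int) hg' (by positivity) hplt
      unfold pvEnt
      rw [hidx, hdm.1, hdm.2, hval p hp]
  -- choose the branch by the parity of row j+1
  by_cases hj : ((j:Int)) % 2 = 0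
  · have hmod : PySem.Int.mod ((j:Int) + 1) 2 = 1 := by
      rw [PySem.Int.mod_eq_emod_of_pos (by norm_num)]
      omega
    split_ifs with hcond
    · rw [Int.toNat_natCast]
      exact hrow 1 1 (by
        intro p hp
        rw [if_pos hj]
        ring)
    · exfalso; rw [hmod] at hcond; exact hcond rfl
  · have hmod : PySem.Int.mod ((j:Int) + 1) 2 = 0 := by
      rw [PySem.Int.mod_eq_emod_of_pos (by norm_num)]
      omega
    split_ifs with hcond
    · exfalso; rw [hmod] at hcond; simp at hcond
    · rw [Int.toNat_natCast]
      exact hrow (-1) (gn:Int) (by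
        intro p hp
        rw [if_neg hj]
        ring)

-- B's outer loop: fuel rows starting after j full rows
lemma pvBrows (gn : Nat) (hg : 0 < gn) (n : Nat) :
    ∀ (fuel j : Nat),
    pvRowsLoop (n:Int) (gn:Int) fuel ((j:Int) + 1)
        (PySem.Dict.mk (pvEntList (gn:Int) (min n (j * gn))), ((min n (j * gn) : Nat) : Int) + 1)
      = (PySem.Dict.mk (pvEntList (gn:Int) (min n ((j + fuel) * gn))),
         ((min n ((j + fuel) * gn) : Nat) : Int) + 1) := by
  intro fuel
  induction fuel with
  | zero =>
      intro j
      simp [pvRowsLoop]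
  | succ fuel ih =>
      intro j
      simp only [pvRowsLoop]
      rw [pvRowStep gn hg n j]
      have hmono : (j + 1) * gn ≤ (j + 1 + fuel) * gn :=
        Nat.mul_le_mul_right gn (by omega)
      by_cases hbr : (((min n ((j + 1) * gn) : Nat) : Int) + 1 > (n:Int))
      · rw [if_pos hbr]
        have heq : min n ((j + 1) * gn) = min n ((j + (fuel + 1)) * gn) := by
          have h1 : (j + (fuel + 1)) * gn = (j + 1 + fuel) * gn := by ring
          omega
        rw [heq]
      · rw [if_neg hbr]
        have hcast : (j:Int) + 1 + 1 = ((j + 1 : Nat) : Int) + 1 := by push_cast; ring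
        rw [hcast, ih (j + 1)]
        have heq : min n ((j + 1 + fuel) * gn) = min n ((j + (fuel + 1)) * gn) := by
          have h1 : (j + (fuel + 1)) * gn = (j + 1 + fuel) * gn := by ring
          omega
        rw [heq]

lemma pvBfold (g : Int) (hg : 0 < g) (n : Nat) :
    pos_mat_alt (n : Int) g = pvEntList g n := by
  obtain ⟨gn, rfl⟩ : ∃ gn : Nat, g = (gn : Nat) := ⟨g.toNat, by omega⟩
  have hgn : 0 < gn := by exact_mod_cast hg
  have hfd : PySem.Int.floordiv (-(n:Int)) (gn:Int) = (-(n:Int)) / (gn:Int) :=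
    PySem.Int.floordiv_eq_ediv_of_pos hg
  have hq := Int.mul_ediv_add_emod (-(n:Int)) (gn:Int)
  have hr0 : 0 ≤ (-(n:Int)) % (gn:Int) := Int.emod_nonneg _ (by omega)
  have hrg : (-(n:Int)) % (gn:Int) < (gn:Int) := Int.emod_lt_of_pos _ hg
  have hqle : (-(n:Int)) / (gn:Int) ≤ 0 := by nlinarith [hq, hr0, hrg, hg]
  obtain ⟨R, hR⟩ : ∃ R : Nat, -((-(n:Int)) / (gn:Int)) = (R : Int) :=
    ⟨(-((-(n:Int)) / (gn:Int))).toNat, by omega⟩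
  have hcov : n ≤ R * gn := by
    have h1 : (R:Int) * (gn:Int) = -((gn:Int) * ((-(n:Int)) / (gn:Int))) := by
      rw [← hR]; ring
    have h2 : (n:Int) ≤ (R:Int) * (gn:Int) := by rw [h1]; linarith
    exact_mod_cast h2
  simp only [pos_mat_alt, hfd, hR]
  rw [Int.toNat_natCast]
  have hB0 := pvBrows gn hgn n R 0
  have hnil : pvEntList (gn:Int) 0 = [] := rfl
  simp only [Nat.zero_mul, Nat.min_zero, Nat.cast_zero, zero_add, hnil] at hB0
  have hemp : (PySem.Dict.empty : PySem.Dict Int (Int × Int)) = PySem.Dict.mk [] := by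
    apply PySem.Dict.ext
    simp [PySem.Dict.empty]
  rw [hemp, hB0]
  have hminn : min n (R * gn) = n := by omega
  rw [hminn]

-- ===== VERDICT (by name: the statement is the Claim_ definition above) =====
theorem pos_mat_spec : Claim_equal_pos_mat := by
  intro gmax g _hdom hpre
  unfold Spec_pos_mat
  by_cases hmax : gmax ≤ 0
  · -- no cell is placed: A's loop has no iterations, B breaks in (or before) its first row
    have hA : gmax.toNat = 0 := by omega
    have hBstop : ∀ (fuel : Nat) (row : Int),
        g.toNat = 0 ∨ fuel = 0 →
        pvRowsLoop gmax g fuel row (PySem.Dict.empty, 1) = (PySem.Dict.empty, 1) := by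
      intro fuel row h
      cases fuel with
      | zero => rfl
      | succ fuel =>
          have h0 : g.toNat = 0 := by omega
          simp only [pvRowsLoop, h0]
          have hloop : ∀ (stp col : Int),
              pvRowLoop gmax row stp 0 col (PySem.Dict.empty, 1) = (PySem.Dict.empty, 1) := by
            intro stp col; rfl
          rw [hloop, hloop, ite_self, if_pos (by omega : (1:Int) > gmax)]
    rcases hpre with hg | ⟨_, hgne⟩
    · -- 0 < g : B's row count is ≤ 0, so its loop has no fuel
      have hq : 0 ≤ PySem.Int.floordiv (-gmax) g := by
        rw [PySem.Int.floordiv_eq_ediv_of_pos hg]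
        exact Int.ediv_nonneg (by omega) (by omega)
      simp only [pos_mat, pos_mat_alt, hA, posMatLoop]
      rw [hBstop _ _ (Or.inr (by omega))]
    · rcases lt_or_gt_of_ne hgne with hneg | hg
      · -- g < 0 : the first row's column walk has no fuel and the break fires at once
        simp only [pos_mat, pos_mat_alt, hA, posMatLoop]
        rw [hBstop _ _ (Or.inl (by omega))]
      · -- 0 < g again (first disjunct not taken)
        have hq : 0 ≤ PySem.Int.floordiv (-gmax) g := by
          rw [PySem.Int.floordiv_eq_ediv_of_pos hg]
          exact Int.ediv_nonneg (by omega) (by omega)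
        simp only [pos_mat, pos_mat_alt, hA, posMatLoop]
        rw [hBstop _ _ (Or.inr (by omega))]
  · have hg : 0 < g := by
      rcases hpre with hg | ⟨h0, _⟩
      · exact hg
      · omega
    obtain ⟨n, hn⟩ : ∃ n : Nat, gmax = (n : Int) := ⟨gmax.toNat, by omega⟩
    subst hn
    rw [pos_mat, Int.toNat_natCast, pvLoopRange g (by omega) n 0, zero_add,
        pvAfold g hg n, pvBfold g hg n]
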